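-- pv_equiv track=rewrite | github.com/EleSar1/programming-basics-array-objects | projects/018-text-messaging/python/main.py | text_message_to_keys
-- ===== SOURCE A (Python) =====
-- def text_message_to_keys(message: str="") -> str:
--
--     """
--     Converts a text message into key presses on a classic mobile phone keypad.
--
--     Letters are mapped to their respective keys and repeated based on position
--     (e.g., 'A' -> '2', 'B' -> '22'). Digits require extra presses (e.g., '2' -> '2222').
--
--     Parameters:
--         message (str): The input text.
--
--     Returns:
--         str: The corresponding key press sequence.
--
--     Raises:
--         TypeError: If input is not a string.
--
--     Example:
--         >>> text_message_to_keys("Hi!")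
--         '444441111'
--     """
--
--     if not isinstance(message, str):
--         raise TypeError("Expected string, got a non-string parameter.")
--
--     if message == "":
--         return message
--
--     phone_keypad = {".": "1", ",": "11", "?": "111", "!": "1111", ":": "11111", "1": "111111",
--                     "A": "2", "B": "22", "C": "222", "2": "2222", "D": "3", "E": "33",
--                     "F": "333", "3": "3333", "G": "4", "H": "44", "I": "444", "4": "4444",
--                     "J": "5", "K": "55", "L": "555", "5": "5555", "M": "6", "N": "66", "O": "666",
--                     "6": "6666", "P": "7", "Q": "77", "R": "777", "S": "7777", "7": "77777",
--                     "T": "8", "U": "88", "V": "888", "8": "8888", "W": "9", "X": "99", "Y": "999",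
--                     "Z": "9999", "9": "99999",  " " : "0", "0": "00"}
--
--     pressed_keys = ""
--     upper_msg = message.upper()
--
--     for char in upper_msg:
--         if char in phone_keypad:
--             pressed_keys += phone_keypad[char]
--
--     return pressed_keys
-- ===== SOURCE B (Python) =====
-- def text_message_to_keys(message=""):
--     if not isinstance(message, str):
--         raise TypeError("Expected string, got a non-string parameter.")
--
--     if message == "":
--         return message
--
--     out = []
--     for ch in message.upper():
--         if 'A' <= ch <= 'Z':
--             # closed-form keypad arithmetic on the letter's alphabet index
--             i = ord(ch) - 65
--             if i < 15:            # A..O: keys 2..6 hold 3 letters each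
--                 out.append(chr(50 + i // 3) * (i % 3 + 1))
--             elif i < 19:          # PQRS on key 7
--                 out.append('7' * (i - 14))
--             elif i < 22:          # TUV on key 8
--                 out.append('8' * (i - 18))
--             else:                 # WXYZ on key 9
--                 out.append('9' * (i - 21))
--         elif '0' <= ch <= '9':
--             if ch == '0':
--                 out.append('00')
--             elif ch == '1':
--                 out.append('111111')
--             elif ch == '7' or ch == '9':
--                 out.append(ch * 5)
--             else:
--                 out.append(ch * 4)
--         elif ch == ' ':
--             out.append('0')
--         else:
--             p = ".,?!:".find(ch)
--             if p >= 0: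
--                 out.append('1' * (p + 1))
--
--     return ''.join(out)
-- ===== Notes on version B (the rewrite author's own statement) =====
-- stated objective: alternative
-- what changed: Replaces A's 42-entry character-to-sequence lookup table with closed-form keypad arithmetic: a letter's digit and press count are computed from its alphabet index (i//3, i%3 for A-O, explicit offsets for the 4-letter keys 7 and 9), digits and space by range tests, leaving only the 5-character punctuation run to a find.
import Mathlib
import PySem

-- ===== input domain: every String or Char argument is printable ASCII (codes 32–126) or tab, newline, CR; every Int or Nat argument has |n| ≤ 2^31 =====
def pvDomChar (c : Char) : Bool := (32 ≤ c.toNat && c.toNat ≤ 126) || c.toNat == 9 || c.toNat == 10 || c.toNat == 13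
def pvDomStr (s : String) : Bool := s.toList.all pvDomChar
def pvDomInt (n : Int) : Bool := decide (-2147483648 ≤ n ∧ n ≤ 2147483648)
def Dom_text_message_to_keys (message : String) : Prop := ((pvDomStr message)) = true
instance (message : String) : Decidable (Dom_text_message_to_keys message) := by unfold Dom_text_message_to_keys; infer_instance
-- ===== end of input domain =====

-- B replaces A's 42-entry lookup table by closed-form keypad arithmetic: the digit and
-- press count of a letter are computed from its alphabet index (objective: alternative).

-- ===== PORT A =====
-- Python's dict literal keyed by 1-char strings; iteration over the message yields single
-- characters, so the dict is ported keyed by Char (exact). Values kept as List Char.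
def pvKeypadA : PySem.Dict Char (List Char) := PySem.Dict.mk  -- 42 distinct keys: the dict literal is this association list
  [('.', "1".toList), (',', "11".toList), ('?', "111".toList), ('!', "1111".toList),
   (':', "11111".toList), ('1', "111111".toList),
   ('A', "2".toList), ('B', "22".toList), ('C', "222".toList), ('2', "2222".toList),
   ('D', "3".toList), ('E', "33".toList), ('F', "333".toList), ('3', "3333".toList),
   ('G', "4".toList), ('H', "44".toList), ('I', "444".toList), ('4', "4444".toList),
   ('J', "5".toList), ('K', "55".toList), ('L', "555".toList), ('5', "5555".toList),
   ('M', "6".toList), ('N', "66".toList), ('O', "666".toList), ('6', "6666".toList),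
   ('P', "7".toList), ('Q', "77".toList), ('R', "777".toList), ('S', "7777".toList),
   ('7', "77777".toList),
   ('T', "8".toList), ('U', "88".toList), ('V', "888".toList), ('8', "8888".toList),
   ('W', "9".toList), ('X', "99".toList), ('Y', "999".toList), ('Z', "9999".toList),
   ('9', "99999".toList), (' ', "0".toList), ('0', "00".toList)]

def text_message_to_keys (message : String) : String :=
  if message == "" then message
  else
    let upper := PySem.Chars.upper message.toList
    String.ofList (upper.foldl (fun acc c =>
      match pvKeypadA.get? c with
      | some v => acc ++ v          -- 'if char in phone_keypad: pressed_keys += phone_keypad[char]'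
      | none => acc) [])

-- ===== PORT B =====
-- per-character body of Source B's loop: 'A'<=ch<='Z' / '0'<=ch<='9' are the code-point range
-- tests (exact: Char comparison is code-point order), chr/ord is Char.ofNat/Char.toNat,
-- 'd * k' is List.replicate, ".,?!:".find(ch) is PySem.Chars.find (exact).
def pvPressB (c : Char) : List Char :=
  let n := c.toNat
  if 65 ≤ n ∧ n ≤ 90 then
    let i := n - 65
    if i < 15 then List.replicate (i % 3 + 1) (Char.ofNat (50 + i / 3))
    else if i < 19 then List.replicate (i - 14) '7'
    else if i < 22 then List.replicate (i - 18) '8'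
    else List.replicate (i - 21) '9'
  else if 48 ≤ n ∧ n ≤ 57 then
    if c = '0' then "00".toList
    else if c = '1' then "111111".toList
    else if c = '7' ∨ c = '9' then List.replicate 5 c
    else List.replicate 4 c
  else if c = ' ' then "0".toList
  else
    let p := PySem.Chars.find ".,?!:".toList [c]
    if 0 ≤ p then List.replicate (p.toNat + 1) '1' else []

def text_message_to_keys_alt (message : String) : String :=
  if message == "" then message
  else
    String.ofList ((PySem.Chars.upper message.toList).foldl
      (fun acc c => acc ++ pvPressB c) [])

-- ===== PRECONDITION & SPEC =====
def Spec_text_message_to_keys (message : String) (out : String) : Prop := out = text_message_to_keys_alt message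
instance (message : String) (out : String) : Decidable (Spec_text_message_to_keys message out) := by unfold Spec_text_message_to_keys; infer_instance

-- ===== CLAIM (what is proved, stated in full; the proofs are below) =====
def Claim_equal_text_message_to_keys : Prop := ∀ (message : String), Dom_text_message_to_keys message → Spec_text_message_to_keys message (text_message_to_keys message)

-- ===== LEMMAS AND PROOFS =====

set_option maxRecDepth 100000 in
set_option maxHeartbeats 1000000 in
theorem pvStep_eq (c : Char) :
    (match pvKeypadA.get? c with | some v => v | none => ([] : List Char)) = pvPressB c := by
  by_cases hL : 65 ≤ c.toNat ∧ c.toNat ≤ 90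
  · -- a letter: 26 concrete cases
    obtain ⟨h1, h2⟩ := hL
    have hc := (Char.ofNat_toNat c).symm
    interval_cases h : c.toNat <;> rw [hc] <;> decide
  · by_cases hD : 48 ≤ c.toNat ∧ c.toNat ≤ 57
    · -- a digit: 10 concrete cases
      obtain ⟨h1, h2⟩ := hD
      have hc := (Char.ofNat_toNat c).symm
      interval_cases h : c.toNat <;> rw [hc] <;> decide
    · by_cases hS : c = ' '
      · subst hS; decide
      · by_cases hP : c = '.' ∨ c = ',' ∨ c = '?' ∨ c = '!' ∨ c = ':'
        · rcases hP with h | h | h | h | h <;> subst h <;> decide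
        · -- c matches no keypad entry: both sides are empty
          push Not at hP
          obtain ⟨p1, p2, p3, p4, p5⟩ := hP
          have hA : pvKeypadA.get? c = none := by
            rw [PySem.Dict.get?_eq_none_iff_not_mem_keys]
            intro hmem
            have hmem' : c ∈ ['.', ',', '?', '!', ':', '1', 'A', 'B', 'C', '2', 'D', 'E',
                'F', '3', 'G', 'H', 'I', '4', 'J', 'K', 'L', '5', 'M', 'N', 'O', '6',
                'P', 'Q', 'R', 'S', '7', 'T', 'U', 'V', '8', 'W', 'X', 'Y', 'Z', '9',
                ' ', '0'] := by
              simpa [pvKeypadA, PySem.Dict.keys] using hmem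
            fin_cases hmem' <;> first
              | exact hL (by decide)
              | exact hD (by decide)
              | exact hS rfl
              | exact p1 rfl
              | exact p2 rfl
              | exact p3 rfl
              | exact p4 rfl
              | exact p5 rfl
          have hF : PySem.Chars.find ['.', ',', '?', '!', ':'] [c] = -1 := by
            rw [PySem.Chars.find_eq_neg_one_iff, List.singleton_infix_iff]
            simp [p1, p2, p3, p4, p5]
          simp [pvPressB, hA, hF, hL, hD, hS]

theorem pvFold_eq (l : List Char) (acc : List Char) :
    l.foldl (fun acc c =>
      match pvKeypadA.get? c with
      | some v => acc ++ v
      | none => acc) acc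
    = l.foldl (fun acc c => acc ++ pvPressB c) acc := by
  induction l generalizing acc with
  | nil => rfl
  | cons c l ih =>
      simp only [List.foldl_cons]
      rw [← ih]
      congr 1
      have := pvStep_eq c
      cases h : pvKeypadA.get? c <;> simp [h] at this ⊢ <;> simp [this]

-- ===== VERDICT (by name: the statement is the Claim_ definition above) =====
theorem text_message_to_keys_spec : Claim_equal_text_message_to_keys := by
  intro message _
  unfold Spec_text_message_to_keys text_message_to_keys text_message_to_keys_alt
  by_cases h : message == ""
  · simp [h]
  · simp only [h, Bool.false_eq_true, if_false]
    rw [pvFold_eq]
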